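-- pv_equiv track=rewrite | github.com/BakhturinaPolina/The-Romance-Formula-Goodreads-Reviews-BERTopic-Rating-Predictor | archive/deduplication_archive_20250925_023350/graph_grow.py | _tri_possible
-- ===== SOURCE A (Python) =====
-- def _tri_possible(nei: set[str], edge_set: set[tuple[str,str]]) -> bool:
--     """Require at least one triangle among the neighbors (why: blocks chainy attachments)."""
--     if len(nei) < 2:
--         return False
--     lst = list(nei)
--     for i in range(len(lst)):
--         for j in range(i+1, len(lst)):
--             u, v = lst[i], lst[j]
--             if (u,v) in edge_set or (v,u) in edge_set:
--                 return True
--     return False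
-- ===== SOURCE B (Python) =====
-- def _tri_possible(nei: set[str], edge_set: set[tuple[str,str]]) -> bool:
--     """Single pass over the edges: an edge between two distinct neighbors means a triangle."""
--     for u, v in edge_set:
--         if u in nei and v in nei and u != v:
--             return True
--     return False
-- ===== Notes on version B (the rewrite author's own statement) =====
-- stated objective: faster
-- what changed: B replaces A's nested scan over all unordered neighbor pairs with a single pass over edge_set, testing each edge's endpoints for membership in nei (and distinctness), returning on the first hit.
import Mathlib
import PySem

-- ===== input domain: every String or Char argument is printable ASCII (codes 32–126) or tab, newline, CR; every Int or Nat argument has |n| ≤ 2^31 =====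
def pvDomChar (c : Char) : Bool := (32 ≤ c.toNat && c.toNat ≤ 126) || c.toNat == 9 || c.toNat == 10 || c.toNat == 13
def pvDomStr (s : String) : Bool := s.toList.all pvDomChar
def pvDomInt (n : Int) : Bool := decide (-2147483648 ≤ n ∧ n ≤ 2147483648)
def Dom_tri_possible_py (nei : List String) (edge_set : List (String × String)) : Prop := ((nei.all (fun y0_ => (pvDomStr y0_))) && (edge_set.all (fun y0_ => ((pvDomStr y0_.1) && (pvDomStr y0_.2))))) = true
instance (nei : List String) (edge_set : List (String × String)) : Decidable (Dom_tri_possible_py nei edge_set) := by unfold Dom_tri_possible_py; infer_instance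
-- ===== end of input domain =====

-- B scans the edge set once, testing both endpoints for membership in nei, instead of A's nested scan over all neighbor pairs; return value only, no mutation.
-- ===== PORT A =====
-- for-loops with early return → .any; range(i+1, len) → List.range' (i+1) (len-(i+1)) (exact: step 1, same elements); '(u,v) in edge_set' → contains
def tri_possible_py (nei : List String) (edge_set : List (String × String)) : Bool :=
  if nei.length < 2 then false
  else
    (List.range nei.length).any fun i =>
      (List.range' (i+1) (nei.length - (i+1))).any fun j =>
        let u := nei.getD i ""
        let v := nei.getD j ""
        edge_set.contains (u, v) || edge_set.contains (v, u)

-- ===== PORT B =====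
def tri_possible_py_alt (nei : List String) (edge_set : List (String × String)) : Bool :=
  edge_set.any fun uv => nei.contains uv.1 && nei.contains uv.2 && uv.1 != uv.2

-- ===== PRECONDITION & SPEC =====
-- Pre_ requires nei to have no duplicates: nei models the Python set[str] argument, whose elements are distinct by construction; a duplicated list corresponds to no Python input.
def Pre_tri_possible_py (nei : List String) (edge_set : List (String × String)) : Prop := nei.Nodup
instance (nei : List String) (edge_set : List (String × String)) : Decidable (Pre_tri_possible_py nei edge_set) := by unfold Pre_tri_possible_py; infer_instance
def pvWitness_tri_possible_py : List String × (List (String × String)) := (["a", "b"], [("a", "b")])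
def Spec_tri_possible_py (nei : List String) (edge_set : List (String × String)) (out : Bool) : Prop := out = tri_possible_py_alt nei edge_set
instance (nei : List String) (edge_set : List (String × String)) (out : Bool) : Decidable (Spec_tri_possible_py nei edge_set out) := by unfold Spec_tri_possible_py; infer_instance

-- ===== CLAIM (what is proved, stated in full; the proofs are below) =====
def Claim_equal_tri_possible_py : Prop := ∀ (nei : List String) (edge_set : List (String × String)), Dom_tri_possible_py nei edge_set → Pre_tri_possible_py nei edge_set → Spec_tri_possible_py nei edge_set (tri_possible_py nei edge_set)

-- ===== LEMMAS AND PROOFS =====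

theorem triA_iff (nei : List String) (es : List (String × String)) :
    tri_possible_py nei es = true ↔
      ∃ i j, i < j ∧ j < nei.length ∧
        ((nei.getD i "", nei.getD j "") ∈ es ∨ (nei.getD j "", nei.getD i "") ∈ es) := by
  unfold tri_possible_py
  split_ifs with h
  · simp only [false_iff]
    rintro ⟨i, j, hij, hj, -⟩; omega
  · simp only [List.any_eq_true, List.mem_range, List.mem_range'_1, Bool.or_eq_true,
      List.contains_iff_mem]
    constructor
    · rintro ⟨i, hi, j, ⟨hij, hj⟩, hc⟩
      exact ⟨i, j, hij, by omega, hc⟩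
    · rintro ⟨i, j, hij, hj, hc⟩
      exact ⟨i, by omega, j, ⟨hij, by omega⟩, hc⟩

theorem triB_iff (nei : List String) (es : List (String × String)) :
    tri_possible_py_alt nei es = true ↔
      ∃ uv ∈ es, uv.1 ∈ nei ∧ uv.2 ∈ nei ∧ uv.1 ≠ uv.2 := by
  unfold tri_possible_py_alt
  simp [List.any_eq_true, and_assoc]

-- ===== VERDICT (by name: the statement is the Claim_ definition above) =====
theorem tri_possible_py_spec : Claim_equal_tri_possible_py := by
  intro nei es _ hnd
  unfold Spec_tri_possible_py
  rw [Bool.eq_iff_iff, triA_iff, triB_iff]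
  constructor
  · rintro ⟨i, j, hij, hj, hc⟩
    have hi : i < nei.length := by omega
    have hne : nei.getD i "" ≠ nei.getD j "" := by
      rw [List.getD_eq_getElem _ _ hi, List.getD_eq_getElem _ _ hj]
      intro h
      exact absurd ((List.Nodup.getElem_inj_iff hnd).mp h) (by omega)
    have hmi : nei.getD i "" ∈ nei := by
      rw [List.getD_eq_getElem _ _ hi]; exact List.getElem_mem hi
    have hmj : nei.getD j "" ∈ nei := by
      rw [List.getD_eq_getElem _ _ hj]; exact List.getElem_mem hj
    rcases hc with hc | hc
    · exact ⟨_, hc, hmi, hmj, hne⟩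
    · exact ⟨_, hc, hmj, hmi, hne.symm⟩
  · rintro ⟨⟨u, v⟩, hmem, hu, hv, huv⟩
    obtain ⟨i, hi, hiu⟩ := List.mem_iff_getElem.mp hu
    obtain ⟨j, hj, hjv⟩ := List.mem_iff_getElem.mp hv
    have hij : i ≠ j := by
      intro h; exact huv (by rw [← hiu, ← hjv]; simp [h])
    rcases Nat.lt_or_ge i j with hlt | hge
    · refine ⟨i, j, hlt, hj, Or.inl ?_⟩
      rw [List.getD_eq_getElem _ _ hi, List.getD_eq_getElem _ _ hj, hiu, hjv]
      exact hmem
    · have hlt : j < i := by omega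
      refine ⟨j, i, hlt, hi, Or.inr ?_⟩
      rw [List.getD_eq_getElem _ _ hi, List.getD_eq_getElem _ _ hj, hiu, hjv]
      exact hmem
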